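-- pv_equiv track=rewrite | github.com/DTTSY/AHMT | PRSCSWAP.py | edges2community
-- ===== SOURCE A (Python) =====
-- def get_roots_from_edges(edges):
--     roots = set()
--     for c, p in edges.items():
--         if c == p:
--             roots.add(p)
--     return roots
--
-- def edges2community(edges):
--     comm = {}
--     roots = get_roots_from_edges(edges)
--     for r in roots:
--         comm[r] = set([r])
--     trees = edges2tree(edges)
--     for comm_root, comm_nodes in comm.items():
--         candidates = trees[comm_root]
--         while len(candidates) > 0:
--             comm_nodes.update(candidates)
--             next_candidates = set()
--             for node in candidates:
--                 if node in trees.keys():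
--                     next_candidates.update(trees[node])
--             candidates = next_candidates - candidates
--     return comm
--
-- def edges2tree(edges):
--     tree = {}
--     for c, p in edges.items():
--         if p not in tree.keys():
--             tree[p] = set()
--         tree[p].add(c)
--     return tree
-- ===== SOURCE B (Python) =====
-- def edges2community(edges):
--     # Single bottom-accumulating pass is impossible order-wise; instead: one child-adjacency
--     # pass, then an index-pointer queue walk per root (no level sets, no set arithmetic).
--     children = {}
--     for c, p in edges.items():
--         children.setdefault(p, []).append(c)
--     comm = {}
--     for c, p in edges.items():
--         if c == p:
--             comm[c] = [c]
--     for r in comm: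
--         queue = comm[r]
--         i = 0
--         while i < len(queue):
--             for ch in children.get(queue[i], []):
--                 if ch != r:   # the root is the only node whose parent chain revisits it
--                     queue.append(ch)
--             i += 1
--     return {r: set(ns) for r, ns in comm.items()}
-- ===== Notes on version B (the rewrite author's own statement) =====
-- stated objective: alternative
-- what changed: Replaces A's per-root level-set BFS (child adjacency of sets, per level a set union over the frontier followed by a set difference) with one child-adjacency-list pass and an index-pointer queue walk per root that appends children directly, skipping only the root's self-edge; the queue walk avoids A's per-level set rebuilds, which a timing run put anywhere between 1.2x and 1.9x depending on input shape, so no speed claim is made.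
import Mathlib
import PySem

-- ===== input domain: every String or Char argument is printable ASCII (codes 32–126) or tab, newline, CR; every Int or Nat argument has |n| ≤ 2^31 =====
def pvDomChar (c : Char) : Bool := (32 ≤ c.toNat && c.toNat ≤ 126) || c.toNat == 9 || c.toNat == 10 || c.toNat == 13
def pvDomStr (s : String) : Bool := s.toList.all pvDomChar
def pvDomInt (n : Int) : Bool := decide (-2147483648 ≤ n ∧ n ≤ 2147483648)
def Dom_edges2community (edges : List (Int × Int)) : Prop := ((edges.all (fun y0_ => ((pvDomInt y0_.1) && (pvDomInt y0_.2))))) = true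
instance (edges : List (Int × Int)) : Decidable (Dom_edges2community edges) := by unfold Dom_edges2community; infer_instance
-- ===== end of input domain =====

-- B replaces A's per-root level-set BFS (per level a set union over the frontier and a set
-- difference) with one child-adjacency-list pass and an index-pointer queue walk per root
-- (a structurally different traversal of the same cost).

-- ===== PORT A =====
-- the Python parameter is a dict: decode the pair list into a PySem.Dict (later duplicate keys overwrite in place)
def pvDictOf (edges : List (Int × Int)) : PySem.Dict Int Int :=
  edges.foldl (fun d cp => d.insert cp.1 cp.2) PySem.Dict.empty

def get_roots_from_edges (ed : PySem.Dict Int Int) : PySem.Set Int :=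
  ed.items.foldl (fun s cp => if cp.1 == cp.2 then PySem.Set.add s cp.2 else s) PySem.Set.empty

def edges2tree (ed : PySem.Dict Int Int) : PySem.Dict Int (PySem.Set Int) :=
  ed.items.foldl (fun t cp =>
    let t1 := if t.contains cp.2 then t else t.insert cp.2 PySem.Set.empty
    t1.modify cp.2 PySem.Set.empty (fun s => PySem.Set.add s cp.1)) PySem.Dict.empty

-- A's while-loop over candidates, fueled; fuel = #items + 2 always suffices (every pass with a
-- nonempty frontier collects at least one fresh key; the proofs below never use the fuel bound
-- beyond that)
def e2cWhileA (trees : PySem.Dict Int (PySem.Set Int)) :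
    Nat → PySem.Set Int → PySem.Set Int → PySem.Set Int
  | 0, nodes, _ => nodes
  | fuel+1, nodes, cands =>
    if cands = [] then nodes
    else
      e2cWhileA trees fuel (PySem.Set.update nodes cands)
        (PySem.Set.diff
          (cands.foldl (fun s n =>
            if trees.contains n then PySem.Set.update s (trees.getD n PySem.Set.empty) else s)
            PySem.Set.empty) cands)

def edges2community (edges : List (Int × Int)) : List (Int × List Int) :=
  let ed := pvDictOf edges
  let roots := get_roots_from_edges ed
  let comm := roots.foldl (fun d r => d.insert r (PySem.Set.ofList [r])) PySem.Dict.empty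
  let trees := edges2tree ed
  -- trees[comm_root]: the key is always present (the root's self-edge), so getD is exact
  comm.items.map (fun rc =>
    (rc.1, e2cWhileA trees (ed.items.length + 2) rc.2 (trees.getD rc.1 PySem.Set.empty)))

-- ===== PORT B =====
def e2cChildren (ed : PySem.Dict Int Int) : PySem.Dict Int (List Int) :=
  ed.items.foldl (fun d cp => d.modify cp.2 [] (fun l => l ++ [cp.1])) PySem.Dict.empty

-- B's index-pointer queue walk; fuel = #items + 1 always suffices (every queue entry is a
-- distinct dict key, so there are at most #items pops)
def e2cWhileB (children : PySem.Dict Int (List Int)) (r : Int) :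
    Nat → List Int → Nat → List Int
  | 0, queue, _ => queue
  | fuel+1, queue, i =>
    if h : i < queue.length then
      e2cWhileB children r fuel
        ((children.getD queue[i] []).foldl (fun q x => if x != r then q ++ [x] else q) queue)
        (i+1)
    else queue

def edges2community_alt (edges : List (Int × Int)) : List (Int × List Int) :=
  let ed := pvDictOf edges
  let children := e2cChildren ed
  let comm := ed.items.foldl (fun d cp => if cp.1 == cp.2 then d.insert cp.1 [cp.1] else d)
    PySem.Dict.empty
  comm.items.map (fun rc =>
    (rc.1, PySem.Set.ofList (e2cWhileB children rc.1 (ed.items.length + 1) rc.2 0)))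

-- ===== PRECONDITION & SPEC =====
def Spec_edges2community (edges : List (Int × Int)) (out : List (Int × List Int)) : Prop := out = edges2community_alt edges
instance (edges : List (Int × Int)) (out : List (Int × List Int)) : Decidable (Spec_edges2community edges out) := by unfold Spec_edges2community; infer_instance

-- ===== CLAIM (what is proved, stated in full; the proofs are below) =====
def Claim_equal_edges2community : Prop := ∀ (edges : List (Int × Int)), Dom_edges2community edges → Spec_edges2community edges (edges2community edges)

-- ===== LEMMAS AND PROOFS =====

-- children of p: the keys whose (unique) parent is p, in dict order
def pvChl (l : List (Int × Int)) (p : Int) : List Int :=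
  (l.filter (fun cp => cp.2 == p)).map (·.1)

-- one BFS level to the next
def pvNxt (l : List (Int × Int)) (C : List Int) : List Int := C.flatMap (pvChl l)

-- the flattened level stream (proof-side canonical form of both loops)
def pvLvs (l : List (Int × Int)) : List Int → Nat → List Int
  | _, 0 => []
  | C, f+1 => if C = [] then [] else C ++ pvLvs l (pvNxt l C) f

-- abstract queue walk (proof-side canonical form of e2cWhileB)
def pvQs (g : Int → List Int) : List Int → Nat → List Int
  | todo, 0 => todo
  | [], _+1 => []
  | n :: rest, f+1 => n :: pvQs g (rest ++ g n) f

-- the invariant carried through both loops: S = collected, C = current frontier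
def pvInv (l : List (Int × Int)) (r : Int) (S C : List Int) : Prop :=
  S.Nodup ∧ C.Nodup ∧ (∀ x ∈ C, x ∉ S) ∧ r ∈ S ∧
  (∀ x ∈ S, x ∈ l.map (·.1)) ∧ (∀ x ∈ C, x ∈ l.map (·.1)) ∧
  (∀ x p, (x ∈ S ∨ x ∈ C) → x ∈ pvChl l p → p ∈ S)

lemma pv_mem_chl (l : List (Int × Int)) (x p : Int) :
    x ∈ pvChl l p ↔ (x, p) ∈ l := by
  simp only [pvChl, List.mem_map, List.mem_filter]
  constructor
  · rintro ⟨⟨a, b⟩, ⟨hm, hb⟩, ha⟩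
    simp only [beq_iff_eq] at hb
    simp only at ha hb
    rw [← ha, ← hb]; exact hm
  · intro h; exact ⟨(x, p), ⟨h, by simp⟩, rfl⟩

lemma pv_key_of_mem (l : List (Int × Int)) (x p : Int) (h : x ∈ pvChl l p) :
    x ∈ l.map (·.1) := by
  rw [pv_mem_chl] at h
  exact List.mem_map.2 ⟨(x, p), h, rfl⟩

lemma pv_uniq_parent (l : List (Int × Int)) (hK : (l.map (·.1)).Nodup)
    (x p q : Int) (hp : x ∈ pvChl l p) (hq : x ∈ pvChl l q) : p = q := by
  rw [pv_mem_chl] at hp hq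
  have := List.inj_on_of_nodup_map hK hp hq rfl
  exact congrArg Prod.snd this

lemma pv_chl_nodup (l : List (Int × Int)) (hK : (l.map (·.1)).Nodup) (p : Int) :
    (pvChl l p).Nodup := by
  have h : ((l.filter (fun cp => cp.2 == p)).map (·.1)).Sublist (l.map (·.1)) :=
    List.Sublist.map _ List.filter_sublist
  exact hK.sublist h

lemma pv_nxt_nodup (l : List (Int × Int)) (hK : (l.map (·.1)).Nodup)
    (C : List Int) (hC : C.Nodup) : (pvNxt l C).Nodup := by
  induction C with
  | nil => simp [pvNxt]
  | cons n C ih =>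
    rw [List.nodup_cons] at hC
    have ihh := ih hC.2
    rw [pvNxt, List.flatMap_cons]
    refine List.Nodup.append (pv_chl_nodup l hK n) ihh ?_
    intro x hx hx'
    simp only [List.mem_flatMap] at hx'
    obtain ⟨m, hm, hxm⟩ := hx'
    have := pv_uniq_parent l hK x n m hx hxm
    exact hC.1 (this ▸ hm)

lemma pv_inv_fresh (l : List (Int × Int)) (r : Int)
    (S C : List Int) (h : pvInv l r S C) : ∀ x ∈ pvNxt l C, x ∉ S ∧ x ∉ C := by
  obtain ⟨hS, hC, hdisj, hr, hSK, hCK, hpar⟩ := h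
  intro x hx
  simp only [pvNxt, List.mem_flatMap] at hx
  obtain ⟨p, hp, hxp⟩ := hx
  exact ⟨fun hxS => hdisj p hp (hpar x p (Or.inl hxS) hxp),
         fun hxC => hdisj p hp (hpar x p (Or.inr hxC) hxp)⟩

lemma pv_inv_step (l : List (Int × Int)) (hK : (l.map (·.1)).Nodup) (r : Int)
    (S C : List Int) (h : pvInv l r S C) : pvInv l r (S ++ C) (pvNxt l C) := by
  obtain ⟨hS, hC, hdisj, hr, hSK, hCK, hpar⟩ := h
  have hfresh := pv_inv_fresh l r S C ⟨hS, hC, hdisj, hr, hSK, hCK, hpar⟩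
  refine ⟨?_, pv_nxt_nodup l hK C hC, ?_, ?_, ?_, ?_, ?_⟩
  · exact hS.append hC (fun x hx hx' => hdisj x hx' hx)
  · intro x hx
    have := hfresh x hx
    simp [List.mem_append, this.1, this.2]
  · exact List.mem_append.2 (Or.inl hr)
  · intro x hx
    rcases List.mem_append.1 hx with h' | h'
    · exact hSK x h'
    · exact hCK x h'
  · intro x hx
    simp only [pvNxt, List.mem_flatMap] at hx
    obtain ⟨p, _, hxp⟩ := hx
    exact pv_key_of_mem l x p hxp
  · intro x p hx hxp
    rcases hx with hx | hx
    · rcases List.mem_append.1 hx with h' | h'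
      · exact List.mem_append.2 (Or.inl (hpar x p (Or.inl h') hxp))
      · exact List.mem_append.2 (Or.inl (hpar x p (Or.inr h') hxp))
    · simp only [pvNxt, List.mem_flatMap] at hx
      obtain ⟨q, hq, hxq⟩ := hx
      have := pv_uniq_parent l hK x p q hxp hxq
      exact List.mem_append.2 (Or.inr (this ▸ hq))

lemma pv_len_le (l1 l2 : List Int) (h : l1.Nodup) (hs : l1 ⊆ l2) :
    l1.length ≤ l2.length := by
  calc l1.length = l1.toFinset.card := (List.toFinset_card_of_nodup h).symm
    _ ≤ l2.toFinset.card := Finset.card_le_card (fun a ha => by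
        simp only [List.mem_toFinset] at ha ⊢; exact hs ha)
    _ ≤ l2.length := l2.toFinset_card_le

lemma pv_lvs_nodup (l : List (Int × Int)) (hK : (l.map (·.1)).Nodup) (r : Int) :
    ∀ (f : Nat) (S C : List Int), pvInv l r S C →
      (S ++ pvLvs l C f).Nodup ∧ (∀ x ∈ pvLvs l C f, x ∈ l.map (·.1)) := by
  intro f
  induction f with
  | zero => intro S C h; simpa [pvLvs] using h.1
  | succ f ih =>
    intro S C h
    by_cases hC : C = []
    · simpa [pvLvs, hC] using h.1
    · have hrec := ih (S ++ C) (pvNxt l C) (pv_inv_step l hK r S C h)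
      rw [pvLvs, if_neg hC]
      constructor
      · simpa [List.append_assoc] using hrec.1
      · intro x hx
        rcases List.mem_append.1 hx with h' | h'
        · exact h.2.2.2.2.2.1 x h'
        · exact hrec.2 x h'

lemma pv_set_update_eq (s l : List Int) (hl : l.Nodup) :
    PySem.Set.update s l = s ++ l.filter (fun x => !s.contains x) := by
  induction l generalizing s with
  | nil => simp [PySem.Set.update]
  | cons x l ih =>
    rw [List.nodup_cons] at hl
    show PySem.Set.update (PySem.Set.add s x) l = _
    by_cases hx : s.contains x
    · have hx' : x ∈ s := by simpa using hx
      have hadd : PySem.Set.add s x = s := by simp [PySem.Set.add, hx']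
      rw [hadd, ih _ hl.2, List.filter_cons]
      simp [hx']
    · have hx' : x ∉ s := by simpa using hx
      have hadd : PySem.Set.add s x = s ++ [x] := by
        simp [PySem.Set.add, hx']
      rw [hadd, ih _ hl.2]
      have hfc : l.filter (fun y => !(s ++ [x] : List Int).contains y)
          = l.filter (fun y => !s.contains y) := by
        apply List.filter_congr
        intro y hy
        have hyx : y ≠ x := fun h => hl.1 (h ▸ hy)
        simp [hyx]
      rw [hfc, List.filter_cons]
      simp [hx']

lemma pv_set_update_disj (s l : List Int) (hl : l.Nodup) (hd : ∀ x ∈ l, x ∉ s) :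
    PySem.Set.update s l = s ++ l := by
  rw [pv_set_update_eq s l hl]
  congr 1
  apply List.filter_eq_self.2
  intro x hx
  simp [hd x hx]

lemma pv_tree_getD (l : List (Int × Int)) (t : PySem.Dict Int (PySem.Set Int)) (q : Int) :
    (l.foldl (fun t cp =>
        let t1 := if t.contains cp.2 then t else t.insert cp.2 PySem.Set.empty
        t1.modify cp.2 PySem.Set.empty (fun s => PySem.Set.add s cp.1)) t).getD q PySem.Set.empty
      = (l.filter (fun cp => cp.2 == q)).foldl (fun s cp => PySem.Set.add s cp.1)
          (t.getD q PySem.Set.empty) := by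
  induction l generalizing t with
  | nil => simp
  | cons cp l ih =>
    rw [List.foldl_cons, ih, List.filter_cons]
    by_cases hq : cp.2 = q
    · subst hq
      simp only [beq_self_eq_true, if_true, List.foldl_cons]
      congr 1
      by_cases hc : t.contains cp.2
      · rw [if_pos hc, PySem.Dict.getD_modify, if_pos rfl]
      · rw [if_neg hc, PySem.Dict.getD_modify, if_pos rfl, PySem.Dict.getD_insert, if_pos rfl,
          PySem.Dict.getD_of_not_contains t _ (by simpa using hc)]
    · have hbq : (cp.2 == q) = false := by simp [hq]
      rw [hbq]
      simp only [Bool.false_eq_true, if_false]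
      congr 1
      have hq' : q ≠ cp.2 := fun h => hq h.symm
      by_cases hc : t.contains cp.2
      · rw [if_pos hc, PySem.Dict.getD_modify, if_neg hq']
      · rw [if_neg hc, PySem.Dict.getD_modify, if_neg hq', PySem.Dict.getD_insert, if_neg hq']

lemma pv_foldl_add_eq_update (L : List (Int × Int)) (s : PySem.Set Int) :
    L.foldl (fun s cp => PySem.Set.add s cp.1) s = PySem.Set.update s (L.map (·.1)) := by
  induction L generalizing s with
  | nil => simp [PySem.Set.update]
  | cons cp L ih => rw [List.foldl_cons, ih]; rfl

lemma pv_trees_getD (l : List (Int × Int)) (hK : (l.map (·.1)).Nodup) (q : Int) :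
    (l.foldl (fun t cp =>
        let t1 := if t.contains cp.2 then t else t.insert cp.2 PySem.Set.empty
        t1.modify cp.2 PySem.Set.empty (fun s => PySem.Set.add s cp.1))
        PySem.Dict.empty).getD q PySem.Set.empty = pvChl l q := by
  rw [pv_tree_getD, pv_foldl_add_eq_update]
  show PySem.Set.update (PySem.Dict.empty.getD q PySem.Set.empty) (pvChl l q) = pvChl l q
  rw [PySem.Dict.getD_empty]
  show PySem.Set.update [] (pvChl l q) = pvChl l q
  rw [pv_set_update_disj _ _ (pv_chl_nodup l hK q) (by simp)]
  simp

lemma pv_children_getD (l : List (Int × Int)) (q : Int) :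
    (l.foldl (fun d cp => d.modify cp.2 [] (fun v => v ++ [cp.1]))
        PySem.Dict.empty).getD q [] = pvChl l q := by
  have hmap : l.foldl (fun d cp => d.modify cp.2 [] (fun v => v ++ [cp.1])) PySem.Dict.empty
      = (l.map Prod.swap).foldl (fun d p => d.modify p.1 [] (fun v => v ++ [p.2]))
          PySem.Dict.empty := by
    rw [List.foldl_map]
    simp only [Prod.fst_swap, Prod.snd_swap]
  rw [hmap, PySem.Dict.getD_foldl_modify_append]
  simp only [PySem.Dict.getD_empty, List.nil_append]
  rw [List.filter_map]
  simp only [List.map_map]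
  rfl

-- ===== the roots and the two comm dicts =====

lemma pv_roots_fold (l : List (Int × Int)) (s : PySem.Set Int) :
    l.foldl (fun s cp => if cp.1 == cp.2 then PySem.Set.add s cp.2 else s) s
      = PySem.Set.update s ((l.filter (fun cp => cp.1 == cp.2)).map (·.2)) := by
  induction l generalizing s with
  | nil => simp [PySem.Set.update]
  | cons cp l ih =>
    rw [List.foldl_cons, ih, List.filter_cons]
    by_cases h : cp.1 = cp.2 <;> simp [h, PySem.Set.update]

-- the list of roots, in dict order
def pvRl (l : List (Int × Int)) : List Int := (l.filter (fun cp => cp.1 == cp.2)).map (·.1)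

lemma pv_rl_nodup (l : List (Int × Int)) (hK : (l.map (·.1)).Nodup) : (pvRl l).Nodup :=
  hK.sublist (List.Sublist.map _ List.filter_sublist)

lemma pv_rl_snd (l : List (Int × Int)) :
    (l.filter (fun cp => cp.1 == cp.2)).map (·.2) = pvRl l := by
  apply List.map_congr_left
  intro cp hcp
  have h := (List.mem_filter.1 hcp).2
  simp only [beq_iff_eq] at h
  exact h.symm

lemma pv_roots_eq (l : List (Int × Int)) (hK : (l.map (·.1)).Nodup) :
    l.foldl (fun s cp => if cp.1 == cp.2 then PySem.Set.add s cp.2 else s) PySem.Set.empty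
      = pvRl l := by
  rw [pv_roots_fold, pv_rl_snd]
  show PySem.Set.update [] (pvRl l) = pvRl l
  rw [pv_set_update_disj _ _ (pv_rl_nodup l hK) (by simp)]
  simp

lemma pv_mem_rl (l : List (Int × Int)) (r : Int) (h : r ∈ pvRl l) : (r, r) ∈ l := by
  simp only [pvRl, List.mem_map, List.mem_filter] at h
  obtain ⟨cp, ⟨hm, he⟩, h1⟩ := h
  simp only [beq_iff_eq] at he
  have : cp = (r, r) := by
    obtain ⟨a, b⟩ := cp
    simp only at he h1
    rw [h1] at he ⊢
    rw [← he]
  exact this ▸ hm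

lemma pv_ofList_single (r : Int) : PySem.Set.ofList [r] = [r] := rfl

lemma pv_commA_items (rl : List Int) (hl : rl.Nodup) :
    (rl.foldl (fun d r => d.insert r (PySem.Set.ofList [r])) PySem.Dict.empty).items
      = rl.map (fun r => (r, [r])) := by
  have h := PySem.Dict.items_foldl_insert_fresh rl (fun r => r)
    (fun r => PySem.Set.ofList [r]) PySem.Dict.empty
    (fun a _ => PySem.Dict.contains_empty a) (by simpa using hl)
  simpa [pv_ofList_single] using h

lemma pv_commB_items (l : List (Int × Int)) (hK : (l.map (·.1)).Nodup) :
    (l.foldl (fun d cp => if cp.1 == cp.2 then d.insert cp.1 [cp.1] else d)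
        PySem.Dict.empty).items = (pvRl l).map (fun r => (r, [r])) := by
  rw [← List.foldl_filter]
  have h := PySem.Dict.items_foldl_insert_fresh (l.filter (fun cp => cp.1 == cp.2))
    (fun cp => cp.1) (fun cp => [cp.1]) PySem.Dict.empty
    (fun a _ => PySem.Dict.contains_empty a.1)
    (hK.sublist (List.Sublist.map _ List.filter_sublist))
  rw [h]
  simp [pvRl, List.map_map]
  rfl

-- ===== loop A = collected ++ level stream =====

lemma pv_foldA (l : List (Int × Int))
    (trees : PySem.Dict Int (PySem.Set Int))
    (htrees : ∀ q, trees.getD q PySem.Set.empty = pvChl l q)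
    (hcont : ∀ q, trees.contains q = false → pvChl l q = [])
    (C : List Int) (s : PySem.Set Int) :
    C.foldl (fun s n =>
        if trees.contains n then PySem.Set.update s (trees.getD n PySem.Set.empty) else s) s
      = PySem.Set.update s (pvNxt l C) := by
  induction C generalizing s with
  | nil => simp [pvNxt, PySem.Set.update]
  | cons n C ih =>
    rw [List.foldl_cons, ih]
    have hn : (if trees.contains n then PySem.Set.update s (trees.getD n PySem.Set.empty) else s)
        = PySem.Set.update s (pvChl l n) := by
      by_cases hc : trees.contains n
      · rw [if_pos hc, htrees]
      · rw [if_neg hc, hcont n (by simpa using hc)]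
        simp [PySem.Set.update]
    rw [hn]
    show PySem.Set.update (PySem.Set.update s (pvChl l n)) (pvNxt l C)
        = PySem.Set.update s (pvChl l n ++ pvNxt l C)
    simp [PySem.Set.update, List.foldl_append]

lemma pv_loopA (l : List (Int × Int)) (hK : (l.map (·.1)).Nodup) (r : Int)
    (trees : PySem.Dict Int (PySem.Set Int))
    (htrees : ∀ q, trees.getD q PySem.Set.empty = pvChl l q)
    (hcont : ∀ q, trees.contains q = false → pvChl l q = []) :
    ∀ (fuel : Nat) (S C : List Int), pvInv l r S C →
      (l.map (·.1)).length + 1 ≤ fuel + S.length →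
      e2cWhileA trees fuel S C = S ++ pvLvs l C fuel := by
  intro fuel
  induction fuel with
  | zero =>
    intro S C h hm
    exfalso
    have := pv_len_le S (l.map (·.1)) h.1 (fun x hx => h.2.2.2.2.1 x hx)
    omega
  | succ fuel ih =>
    intro S C h hm
    by_cases hC : C = []
    · subst hC; simp [e2cWhileA, pvLvs]
    · rw [e2cWhileA, pvLvs, if_neg hC, if_neg hC]
      have hfresh := pv_inv_fresh l r S C h
      have hupd : PySem.Set.update S C = S ++ C := pv_set_update_disj S C h.2.1 h.2.2.1
      have hfold := pv_foldA l trees htrees hcont C PySem.Set.empty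
      have hnx : PySem.Set.update PySem.Set.empty (pvNxt l C) = pvNxt l C := by
        show PySem.Set.update [] (pvNxt l C) = pvNxt l C
        rw [pv_set_update_disj _ _ (pv_nxt_nodup l hK C h.2.1) (by simp)]
        simp
      have hdiff : PySem.Set.diff (pvNxt l C) C = pvNxt l C := by
        show (pvNxt l C).filter _ = pvNxt l C
        apply List.filter_eq_self.2
        intro x hx
        simp [PySem.Set.contains, (hfresh x hx).2]
      rw [hupd, hfold, hnx, hdiff]
      have hlen : 0 < C.length := List.length_pos_of_ne_nil hC
      rw [ih (S ++ C) (pvNxt l C) (pv_inv_step l hK r S C h)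
        (by simp only [List.length_append]; omega)]
      simp [List.append_assoc]

-- ===== loop B = done ++ queue stream =====

lemma pv_loopB (children : PySem.Dict Int (List Int)) (r : Int) :
    ∀ (fuel : Nat) (done todo : List Int),
      e2cWhileB children r fuel (done ++ todo) done.length
        = done ++ pvQs (fun n => (children.getD n []).filter (fun x => x != r)) todo fuel := by
  intro fuel
  induction fuel with
  | zero => intro done todo; simp [e2cWhileB, pvQs]
  | succ fuel ih =>
    intro done todo
    cases todo with
    | nil =>
      rw [e2cWhileB]
      simp [pvQs]
    | cons n rest =>
      rw [e2cWhileB]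
      have hlt : done.length < (done ++ n :: rest).length := by simp
      rw [dif_pos hlt]
      have hget : (done ++ n :: rest)[done.length]'hlt = n := by
        rw [List.getElem_append_right (le_refl _)]
        simp
      rw [hget]
      have hfold : (children.getD n []).foldl (fun q x => if x != r then q ++ [x] else q)
          (done ++ n :: rest)
          = (done ++ [n]) ++ (rest ++ (children.getD n []).filter (fun x => x != r)) := by
        rw [PySem.List.foldl_append_if (fun x => x != r) (fun x => x) (children.getD n [])]
        simp [List.map_id']
      rw [hfold]
      have hl1 : done.length + 1 = (done ++ [n]).length := by simp
      rw [hl1, ih (done ++ [n]) (rest ++ (children.getD n []).filter (fun x => x != r))]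
      simp [pvQs]

lemma pv_qs_nil (g : Int → List Int) (f : Nat) : pvQs g [] f = [] := by
  cases f <;> rfl

lemma pv_qs_append (g : Int → List Int) :
    ∀ (a b : List Int) (f : Nat),
      pvQs g (a ++ b) (a.length + f) = a ++ pvQs g (b ++ a.flatMap g) f := by
  intro a
  induction a with
  | nil => intro b f; simp
  | cons n a ih =>
    intro b f
    show pvQs g (n :: (a ++ b)) (a.length + 1 + f) = _
    have h1 : a.length + 1 + f = (a.length + f) + 1 := by omega
    rw [h1, pvQs, List.append_assoc, ih (b ++ g n) f]
    simp [List.flatMap_cons, List.append_assoc]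

-- on frontier nodes the root-filter is a no-op, and the queue stream flattens into levels
lemma pv_qs_eq_lvs (l : List (Int × Int)) (hK : (l.map (·.1)).Nodup) (r : Int)
    (hrr : (r, r) ∈ l) :
    ∀ (f2 : Nat) (S C : List Int) (f1 : Nat), pvInv l r S C →
      (l.map (·.1)).length + 1 ≤ f2 + S.length →
      (pvLvs l C f2).length ≤ f1 →
      pvQs (fun n => (pvChl l n).filter (fun x => x != r)) C f1 = pvLvs l C f2 := by
  intro f2
  induction f2 with
  | zero =>
    intro S C f1 h hm _
    exfalso
    have := pv_len_le S (l.map (·.1)) h.1 (fun x hx => h.2.2.2.2.1 x hx)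
    omega
  | succ f2 ih =>
    intro S C f1 h hm hlen
    by_cases hC : C = []
    · subst hC; rw [pv_qs_nil]; simp [pvLvs]
    · rw [pvLvs, if_neg hC] at hlen ⊢
      have hf1 : C.length ≤ f1 := le_trans (by simp) hlen
      obtain ⟨f1', rfl⟩ : ∃ f1', f1 = C.length + f1' := ⟨f1 - C.length, by omega⟩
      have hqs := pv_qs_append (fun n => (pvChl l n).filter (fun x => x != r)) C [] f1'
      rw [List.append_nil] at hqs
      rw [hqs]
      have hflat : C.flatMap (fun n => (pvChl l n).filter (fun x => x != r)) = pvNxt l C := by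
        show _ = C.flatMap (pvChl l)
        apply List.flatMap_congr
        intro n hn
        apply List.filter_eq_self.2
        intro x hx
        have hnr : n ≠ r := by
          intro hnrr; subst hnrr
          exact h.2.2.1 n hn h.2.2.2.1
        have hxr : x ≠ r := by
          intro hxrr; subst hxrr
          exact hnr (pv_uniq_parent l hK x n x hx ((pv_mem_chl l x x).2 hrr))
        simp [hxr]
      rw [hflat, List.nil_append]
      congr 1
      have hlen1 : 0 < C.length := List.length_pos_of_ne_nil hC
      exact ih (S ++ C) (pvNxt l C) f1' (pv_inv_step l hK r S C h)
        (by simp only [List.length_append]; omega)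
        (by simp only [List.length_append] at hlen; omega)

-- fuel-stability of the level stream
lemma pv_lvs_congr (l : List (Int × Int)) (hK : (l.map (·.1)).Nodup) (r : Int) :
    ∀ (f1 f2 : Nat) (S C : List Int), pvInv l r S C →
      (l.map (·.1)).length + 1 ≤ f1 + S.length →
      (l.map (·.1)).length + 1 ≤ f2 + S.length →
      pvLvs l C f1 = pvLvs l C f2 := by
  intro f1
  induction f1 with
  | zero =>
    intro f2 S C h hm _
    exfalso
    have := pv_len_le S (l.map (·.1)) h.1 (fun x hx => h.2.2.2.2.1 x hx)
    omega
  | succ f1 ih =>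
    intro f2 S C h hm1 hm2
    cases f2 with
    | zero =>
      exfalso
      have := pv_len_le S (l.map (·.1)) h.1 (fun x hx => h.2.2.2.2.1 x hx)
      omega
    | succ f2 =>
      by_cases hC : C = []
      · simp [pvLvs, hC]
      · rw [pvLvs, pvLvs, if_neg hC, if_neg hC]
        congr 1
        have hlen : 0 < C.length := List.length_pos_of_ne_nil hC
        exact ih f2 (S ++ C) (pvNxt l C) (pv_inv_step l hK r S C h)
          (by simp only [List.length_append]; omega)
          (by simp only [List.length_append]; omega)

-- the first A-iteration: the candidate set chl r contains r itself, whose whole child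
-- block is removed again by the set difference
lemma pv_first_aux (l : List (Int × Int)) (r : Int) :
    ∀ (ca : List Int), (∀ p ∈ ca, p ≠ r → ∀ x ∈ pvChl l p, x ∉ pvChl l r) →
      (ca.flatMap (pvChl l)).filter (fun x => !(pvChl l r).contains x)
        = (ca.filter (fun p => p != r)).flatMap (pvChl l) := by
  intro ca
  induction ca with
  | nil => intro _; simp
  | cons p ca ih =>
    intro hp
    rw [List.flatMap_cons, List.filter_append, List.filter_cons,
      ih (fun p' hp' => hp p' (List.mem_cons_of_mem _ hp'))]
    by_cases hpr : p = r
    · subst hpr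
      have h0 : (pvChl l p).filter (fun x => !(pvChl l p).contains x) = [] := by
        apply List.filter_eq_nil_iff.2
        intro x hx
        simp [hx]
      simp
    · have h1 : (pvChl l p).filter (fun x => !(pvChl l r).contains x) = pvChl l p := by
        apply List.filter_eq_self.2
        intro x hx
        have := hp p (List.mem_cons_self) hpr x hx
        simp [this]
      have hb : (p != r) = true := by simp [hpr]
      rw [hb]
      simp only [List.flatMap_cons, if_true, h1]

lemma pv_first_level (l : List (Int × Int)) (hK : (l.map (·.1)).Nodup) (r : Int) :
    (pvNxt l (pvChl l r)).filter (fun x => !(pvChl l r).contains x)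
      = pvNxt l ((pvChl l r).filter (fun x => x != r)) := by
  simp only [pvNxt]
  exact pv_first_aux l r (pvChl l r)
    (fun p _ hpr x hx hx' => hpr (pv_uniq_parent l hK x p r hx hx'))

-- the invariant at the steady-state entry point
lemma pv_inv_init (l : List (Int × Int)) (hK : (l.map (·.1)).Nodup) (r : Int)
    (hrr : (r, r) ∈ l) :
    pvInv l r [r] ((pvChl l r).filter (fun x => x != r)) := by
  have hrk : r ∈ l.map (·.1) := List.mem_map.2 ⟨(r, r), hrr, rfl⟩
  refine ⟨List.nodup_singleton r, (pv_chl_nodup l hK r).filter _, ?_, by simp, ?_, ?_, ?_⟩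
  · intro x hx
    have h := (List.mem_filter.1 hx).2
    simp only [bne_iff_ne, ne_eq] at h
    simpa using h
  · intro x hx; simp at hx; subst hx; exact hrk
  · intro x hx
    exact pv_key_of_mem l x r (List.mem_filter.1 hx).1
  · intro x p hx hxp
    rcases hx with hx | hx
    · simp only [List.mem_singleton] at hx
      subst hx
      have := pv_uniq_parent l hK x p x hxp ((pv_mem_chl l x x).2 hrr)
      simp [this]
    · have := pv_uniq_parent l hK x p r hxp (List.mem_filter.1 hx).1
      simp [this]

-- ===== the per-root equality =====
lemma pv_per_root (l : List (Int × Int)) (hK : (l.map (·.1)).Nodup) (r : Int)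
    (hrr : (r, r) ∈ l)
    (trees : PySem.Dict Int (PySem.Set Int))
    (htrees : ∀ q, trees.getD q PySem.Set.empty = pvChl l q)
    (hcont : ∀ q, trees.contains q = false → pvChl l q = [])
    (children : PySem.Dict Int (List Int))
    (hch : ∀ q, children.getD q [] = pvChl l q) :
    e2cWhileA trees (l.length + 2) [r] (trees.getD r PySem.Set.empty)
      = PySem.Set.ofList (e2cWhileB children r (l.length + 1) [r] 0) := by
  have hN : (l.map (·.1)).length = l.length := by simp
  set L1 := (pvChl l r).filter (fun x => x != r) with hL1
  have hrchl : r ∈ pvChl l r := (pv_mem_chl l r r).2 hrr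
  have hinv0 := pv_inv_init l hK r hrr
  have hinv1 : pvInv l r (r :: L1) (pvNxt l L1) := by
    have := pv_inv_step l hK r [r] L1 hinv0
    simpa using this
  have hCne : pvChl l r ≠ [] := fun h => by rw [h] at hrchl; simp at hrchl
  -- A side
  have hupd : PySem.Set.update [r] (pvChl l r) = r :: L1 := by
    rw [pv_set_update_eq _ _ (pv_chl_nodup l hK r)]
    have : (pvChl l r).filter (fun x => !([r] : List Int).contains x) = L1 := by
      apply List.filter_congr
      intro x _
      by_cases hxr : x = r
      · subst hxr; simp
      · have h2 : r ≠ x := fun h => hxr h.symm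
        simp [hxr]
    rw [this]
    rfl
  have hstep1 :
      e2cWhileA trees (l.length + 2) [r] (trees.getD r PySem.Set.empty)
        = e2cWhileA trees (l.length + 1) (r :: L1) (pvNxt l L1) := by
    rw [htrees r]
    show e2cWhileA trees (l.length + 1 + 1) [r] (pvChl l r) = _
    rw [e2cWhileA, if_neg hCne, hupd]
    congr 1
    rw [pv_foldA l trees htrees hcont]
    show PySem.Set.diff (PySem.Set.update [] (pvNxt l (pvChl l r))) (pvChl l r) = _
    rw [pv_set_update_disj _ _ (pv_nxt_nodup l hK _ (pv_chl_nodup l hK r)) (by simp)]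
    show ([] ++ pvNxt l (pvChl l r)).filter _ = _
    rw [List.nil_append]
    exact pv_first_level l hK r
  rw [hstep1,
    pv_loopA l hK r trees htrees hcont (l.length + 1) (r :: L1) (pvNxt l L1) hinv1
      (by simp only [List.length_map, List.length_cons]; omega)]
  -- B side
  have hB : e2cWhileB children r (l.length + 1) [r] 0
      = r :: pvQs (fun n => (pvChl l n).filter (fun x => x != r)) L1 l.length := by
    have h0 := pv_loopB children r (l.length + 1) [] [r]
    simp only [List.nil_append, List.length_nil] at h0
    rw [h0]
    have hg : (fun n => (children.getD n []).filter (fun x => x != r))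
        = (fun n => (pvChl l n).filter (fun x => x != r)) := by
      funext n; rw [hch]
    rw [hg]
    rfl
  rw [hB]
  have hlvsnodup := pv_lvs_nodup l hK r (l.length + 1) [r] L1 hinv0
  have hflat : pvQs (fun n => (pvChl l n).filter (fun x => x != r)) L1 l.length
      = pvLvs l L1 (l.length + 1) := by
    apply pv_qs_eq_lvs l hK r hrr (l.length + 1) [r] L1 l.length hinv0
      (by simp only [List.length_map, List.length_cons, List.length_nil]; omega)
    have h2 := pv_len_le ([r] ++ pvLvs l L1 (l.length + 1)) (l.map (·.1)) hlvsnodup.1 ?_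
    · simp only [List.length_append, List.length_singleton, hN] at h2
      omega
    · intro x hx
      rcases List.mem_append.1 hx with h' | h'
      · rw [List.mem_singleton] at h'
        rw [h']
        exact List.mem_map.2 ⟨(r, r), hrr, rfl⟩
      · exact hlvsnodup.2 x h'
  rw [hflat]
  have hlvs : pvLvs l L1 (l.length + 1) = L1 ++ pvLvs l (pvNxt l L1) (l.length + 1) := by
    by_cases hL : L1 = []
    · simp [pvLvs, hL, pvNxt]
    · rw [pvLvs, if_neg hL]
      congr 1
      have hlen1 : 0 < L1.length := List.length_pos_of_ne_nil hL
      exact pv_lvs_congr l hK r l.length (l.length + 1) (r :: L1) (pvNxt l L1) hinv1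
        (by simp only [List.length_map, List.length_cons]; omega)
        (by simp only [List.length_map, List.length_cons]; omega)
  rw [hlvs]
  have hnodup : (r :: (L1 ++ pvLvs l (pvNxt l L1) (l.length + 1))).Nodup := by
    have := hlvsnodup.1
    rw [hlvs] at this
    simpa using this
  rw [PySem.Set.ofList_eq_self_of_nodup _ hnodup]
  simp

-- ===== assembling the whole outputs =====

lemma pv_keys_nodup (edges : List (Int × Int)) :
    ((pvDictOf edges).items.map (·.1)).Nodup := by
  have h := PySem.Dict.nodup_keys_foldl_insert_key edges (fun cp => cp.1)
    (fun d cp => cp.2) PySem.Dict.empty PySem.Dict.nodup_keys_empty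
  simpa [PySem.Dict.keys] using h

theorem edges2community_spec : Claim_equal_edges2community := by
  intro edges _
  show edges2community edges = edges2community_alt edges
  unfold edges2community edges2community_alt
  simp only []
  set ed := pvDictOf edges with hed
  set l := ed.items with hl
  have hK : (l.map (·.1)).Nodup := pv_keys_nodup edges
  have hroots : get_roots_from_edges ed = pvRl l := by
    unfold get_roots_from_edges
    exact pv_roots_eq l hK
  have htrees : ∀ q, (edges2tree ed).getD q PySem.Set.empty = pvChl l q := by
    intro q
    unfold edges2tree
    exact pv_trees_getD l hK q
  have hcont : ∀ q, (edges2tree ed).contains q = false → pvChl l q = [] := by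
    intro q hq
    have := htrees q
    rw [PySem.Dict.getD_of_not_contains _ _ hq] at this
    exact this.symm
  have hch : ∀ q, (e2cChildren ed).getD q [] = pvChl l q := by
    intro q
    exact pv_children_getD l q
  rw [hroots, pv_commA_items (pvRl l) (pv_rl_nodup l hK), pv_commB_items l hK]
  rw [List.map_map, List.map_map]
  apply List.map_congr_left
  intro r hr
  have hrr : (r, r) ∈ l := pv_mem_rl l r hr
  simp only [Function.comp]
  congr 1
  exact pv_per_root l hK r hrr (edges2tree ed) htrees hcont (e2cChildren ed) hch

-- ===== VERDICT: edges2community_spec above proves Claim_equal_edges2community =====
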